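-- pv_equiv track=rewrite | github.com/liuzhonghe060718/Introduction-to-computation-B | 递归/八皇后解法2.py | is_valid_queen_placement
-- ===== SOURCE A (Python) =====
-- def is_valid_queen_placement(board):
--     main_diag = set()
--     anti_diag = set()
--     for i in range(8):
--         a=i+1 - board[i]
--         b=i+1 + board[i]
--         if a in main_diag or b in anti_diag:
--             return False
--         main_diag.add(a)
--         anti_diag.add(b)
--     return True
-- ===== SOURCE B (Python) =====
-- def is_valid_queen_placement(board):
--     for j in range(8):
--         for i in range(j):
--             if i - board[i] == j - board[j] or i + board[i] == j + board[j]: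
--                 return False
--     return True
-- ===== Notes on version B (the rewrite author's own statement) =====
-- stated objective: alternative
-- what changed: Replaces the incremental insert-and-test scan that grows two diagonal sets with a direct pairwise check comparing the diagonal keys of every index pair i<j, using no sets at all.
import Mathlib
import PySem

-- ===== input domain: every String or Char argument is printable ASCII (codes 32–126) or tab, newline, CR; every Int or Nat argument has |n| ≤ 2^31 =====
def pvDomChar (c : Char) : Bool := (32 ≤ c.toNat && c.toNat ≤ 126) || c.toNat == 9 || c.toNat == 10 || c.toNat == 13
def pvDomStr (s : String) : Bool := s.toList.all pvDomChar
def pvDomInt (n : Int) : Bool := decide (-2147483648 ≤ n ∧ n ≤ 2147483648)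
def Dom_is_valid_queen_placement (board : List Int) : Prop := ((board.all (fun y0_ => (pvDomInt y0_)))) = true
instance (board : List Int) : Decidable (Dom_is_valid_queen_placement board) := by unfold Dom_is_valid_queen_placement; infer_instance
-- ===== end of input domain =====

-- B replaces A's incremental insert-and-test scan over two growing diagonal sets with a
-- direct pairwise comparison of the diagonal keys of every index pair i < j (no sets).

-- ===== PORT A =====
-- the for-loop with early 'return False' and the two growing sets, as structural recursion
def isvqLoop (board : List Int) (l : List Int) (main_diag anti_diag : PySem.Set Int) : Bool :=
  match l with
  | [] => true
  | i :: t =>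
    let a := i + 1 - PySem.List.pyGetD board i 0
    let b := i + 1 + PySem.List.pyGetD board i 0
    if PySem.Set.contains main_diag a || PySem.Set.contains anti_diag b then false
    else isvqLoop board t (PySem.Set.add main_diag a) (PySem.Set.add anti_diag b)

def is_valid_queen_placement (board : List Int) : Bool :=
  isvqLoop board (PySem.List.pyRange 0 8 1) PySem.Set.empty PySem.Set.empty

-- ===== PORT B =====
-- inner loop 'for i in range(j)': first colliding pair returns False
def isvqInner (board : List Int) (j : Int) (l : List Int) : Bool :=
  match l with
  | [] => true
  | i :: t =>
    if (i - PySem.List.pyGetD board i 0 == j - PySem.List.pyGetD board j 0)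
        || (i + PySem.List.pyGetD board i 0 == j + PySem.List.pyGetD board j 0) then false
    else isvqInner board j t

-- outer loop 'for j in range(8)'
def isvqOuter (board : List Int) (l : List Int) : Bool :=
  match l with
  | [] => true
  | j :: t =>
    if isvqInner board j (PySem.List.pyRange 0 j 1) then isvqOuter board t else false

def is_valid_queen_placement_alt (board : List Int) : Bool :=
  isvqOuter board (PySem.List.pyRange 0 8 1)

-- ===== PRECONDITION & SPEC =====
-- Pre_ is exactly where Python A returns: a full 8-queen board, or a shorter board whose
-- available prefix already contains a diagonal collision (A early-returns False there);
-- everywhere else A raises IndexError at board[i].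
def Pre_is_valid_queen_placement (board : List Int) : Prop :=
  8 ≤ board.length ∨
    ¬(((PySem.List.pyRange 0 (min 8 (board.length : Int)) 1).map
          (fun i => i + 1 - PySem.List.pyGetD board i 0)).Nodup ∧
      ((PySem.List.pyRange 0 (min 8 (board.length : Int)) 1).map
          (fun i => i + 1 + PySem.List.pyGetD board i 0)).Nodup)
instance (board : List Int) : Decidable (Pre_is_valid_queen_placement board) := by
  unfold Pre_is_valid_queen_placement; infer_instance

def pvWitness_is_valid_queen_placement : List Int := [1, 5, 8, 6, 3, 7, 2, 4]

def Spec_is_valid_queen_placement (board : List Int) (out : Bool) : Prop :=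
  out = is_valid_queen_placement_alt board
instance (board : List Int) (out : Bool) : Decidable (Spec_is_valid_queen_placement board out) := by
  unfold Spec_is_valid_queen_placement; infer_instance

-- ===== CLAIM (what is proved, stated in full; the proofs are below) =====
def Claim_equal_is_valid_queen_placement : Prop :=
  ∀ (board : List Int), Dom_is_valid_queen_placement board →
    Pre_is_valid_queen_placement board →
    Spec_is_valid_queen_placement board (is_valid_queen_placement board)

-- ===== LEMMAS AND PROOFS =====

-- the early-exit insert-and-test loop returns true iff both key lists are duplicate-free
-- and disjoint from the incoming sets
theorem isvqLoop_iff (board : List Int) (l : List Int) (m a : PySem.Set Int) :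
    isvqLoop board l m a = true ↔
      ((l.map (fun i => i + 1 - PySem.List.pyGetD board i 0)).Nodup ∧
       (l.map (fun i => i + 1 + PySem.List.pyGetD board i 0)).Nodup ∧
       (∀ i ∈ l, (i + 1 - PySem.List.pyGetD board i 0) ∉ m) ∧
       (∀ i ∈ l, (i + 1 + PySem.List.pyGetD board i 0) ∉ a)) := by
  induction l generalizing m a with
  | nil => simp [isvqLoop]
  | cons i t ih =>
    simp only [isvqLoop, List.map_cons, List.nodup_cons, List.mem_cons]
    by_cases hm : PySem.Set.contains m (i + 1 - PySem.List.pyGetD board i 0) = true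
    · simp only [hm, Bool.true_or, if_true]
      constructor
      · intro h; exact absurd h (by simp)
      · rintro ⟨-, -, h, -⟩
        exact absurd ((PySem.Set.contains_iff _ _).mp hm) (h i (Or.inl rfl))
    · rw [Bool.not_eq_true] at hm
      have hm' : (i + 1 - PySem.List.pyGetD board i 0) ∉ m := fun h => by
        rw [(PySem.Set.contains_iff _ _).mpr h] at hm; exact absurd hm (by simp)
      by_cases ha : PySem.Set.contains a (i + 1 + PySem.List.pyGetD board i 0) = true
      · simp only [hm, ha, Bool.false_or, if_true]
        constructor
        · intro h; exact absurd h (by simp)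
        · rintro ⟨-, -, -, h⟩
          exact absurd ((PySem.Set.contains_iff _ _).mp ha) (h i (Or.inl rfl))
      · rw [Bool.not_eq_true] at ha
        have ha' : (i + 1 + PySem.List.pyGetD board i 0) ∉ a := fun h => by
          rw [(PySem.Set.contains_iff _ _).mpr h] at ha; exact absurd ha (by simp)
        rw [hm, ha]
        simp only [Bool.false_or, Bool.false_eq_true, if_false]
        rw [ih]
        constructor
        · rintro ⟨h1, h2, h3, h4⟩
          refine ⟨⟨?_, h1⟩, ⟨?_, h2⟩, ?_, ?_⟩
          · intro hmem
            rcases List.mem_map.mp hmem with ⟨j, hj, hje⟩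
            have := h3 j hj
            rw [PySem.Set.mem_add _ _ _] at this
            exact this (Or.inr hje)
          · intro hmem
            rcases List.mem_map.mp hmem with ⟨j, hj, hje⟩
            have := h4 j hj
            rw [PySem.Set.mem_add _ _ _] at this
            exact this (Or.inr hje)
          · rintro j (rfl | hj)
            · exact hm'
            · intro hmem
              have := h3 j hj
              rw [PySem.Set.mem_add _ _ _] at this
              exact this (Or.inl hmem)
          · rintro j (rfl | hj)
            · exact ha'
            · intro hmem
              have := h4 j hj
              rw [PySem.Set.mem_add _ _ _] at this
              exact this (Or.inl hmem)
        · rintro ⟨⟨h1a, h1⟩, ⟨h2a, h2⟩, h3, h4⟩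
          refine ⟨h1, h2, ?_, ?_⟩
          · intro j hj
            rw [PySem.Set.mem_add _ _ _]
            rintro (hmem | heq)
            · exact h3 j (Or.inr hj) hmem
            · exact h1a (heq ▸ List.mem_map.mpr ⟨j, hj, rfl⟩)
          · intro j hj
            rw [PySem.Set.mem_add _ _ _]
            rintro (hmem | heq)
            · exact h4 j (Or.inr hj) hmem
            · exact h2a (heq ▸ List.mem_map.mpr ⟨j, hj, rfl⟩)

-- the inner loop returns true iff no i in l collides with j on either diagonal
theorem isvqInner_iff (board : List Int) (j : Int) (l : List Int) :
    isvqInner board j l = true ↔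
      ∀ i ∈ l, ¬(i - PySem.List.pyGetD board i 0 = j - PySem.List.pyGetD board j 0 ∨
                 i + PySem.List.pyGetD board i 0 = j + PySem.List.pyGetD board j 0) := by
  induction l with
  | nil => simp [isvqInner]
  | cons i t ih =>
    simp only [isvqInner, List.mem_cons]
    by_cases hc : (i - PySem.List.pyGetD board i 0 = j - PySem.List.pyGetD board j 0 ∨
                   i + PySem.List.pyGetD board i 0 = j + PySem.List.pyGetD board j 0)
    · have hb : ((i - PySem.List.pyGetD board i 0 == j - PySem.List.pyGetD board j 0)
          || (i + PySem.List.pyGetD board i 0 == j + PySem.List.pyGetD board j 0)) = true := by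
        rcases hc with h | h <;> simp [h]
      rw [hb]
      simp only [if_true]
      constructor
      · intro h; exact absurd h (by simp)
      · intro h; exact absurd hc (h i (Or.inl rfl))
    · have hb : ((i - PySem.List.pyGetD board i 0 == j - PySem.List.pyGetD board j 0)
          || (i + PySem.List.pyGetD board i 0 == j + PySem.List.pyGetD board j 0)) = false := by
        rcases not_or.mp hc with ⟨h1, h2⟩; simp [h1, h2]
      rw [hb]
      simp only [Bool.false_eq_true, if_false, ih]
      constructor
      · rintro h x (rfl | hx)
        · exact hc
        · exact h x hx
      · intro h x hx; exact h x (Or.inr hx)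

-- the outer loop returns true iff every stage's inner loop does
theorem isvqOuter_iff (board : List Int) (l : List Int) :
    isvqOuter board l = true ↔
      ∀ j ∈ l, isvqInner board j (PySem.List.pyRange 0 j 1) = true := by
  induction l with
  | nil => simp [isvqOuter]
  | cons j t ih =>
    simp only [isvqOuter, List.mem_cons]
    by_cases hc : isvqInner board j (PySem.List.pyRange 0 j 1) = true
    · rw [hc]
      simp only [if_true, ih]
      constructor
      · rintro h x (rfl | hx)
        · exact hc
        · exact h x hx
      · intro h x hx; exact h x (Or.inr hx)
    · rw [Bool.not_eq_true] at hc
      rw [hc]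
      simp only [Bool.false_eq_true, if_false]
      constructor
      · intro h; exact absurd h (by simp)
      · intro h
        have := h j (Or.inl rfl)
        rw [hc] at this
        exact absurd this (by simp)

-- a mapped range is duplicate-free iff f is injective across every ordered index pair
theorem nodup_map_pyRange_iff (board : List Int) (f : Int → Int) (b : Int) :
    ((PySem.List.pyRange 0 b 1).map f).Nodup ↔
      ∀ j, 0 ≤ j → j < b → ∀ i, 0 ≤ i → i < j → f i ≠ f j := by
  unfold List.Nodup
  rw [List.pairwise_map, List.pairwise_iff_getElem]
  have hlen : (PySem.List.pyRange 0 b 1).length = (b - 0).toNat :=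
    PySem.List.length_pyRange_one 0 b
  constructor
  · intro h j hj0 hjb i hi0 hij
    have h1 : i.toNat < (PySem.List.pyRange 0 b 1).length := by rw [hlen]; omega
    have h2 : j.toNat < (PySem.List.pyRange 0 b 1).length := by rw [hlen]; omega
    have := h i.toNat j.toNat h1 h2 (by omega)
    rw [PySem.List.getElem_pyRange_one 0 b i.toNat h1,
        PySem.List.getElem_pyRange_one 0 b j.toNat h2] at this
    rw [show (0 + (i.toNat : Int)) = i by omega, show (0 + (j.toNat : Int)) = j by omega] at this
    exact this
  · intro h k1 k2 h1 h2 hlt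
    rw [PySem.List.getElem_pyRange_one 0 b k1 h1, PySem.List.getElem_pyRange_one 0 b k2 h2]
    rw [hlen] at h1 h2
    exact h (0 + (k2 : Int)) (by omega) (by omega) (0 + (k1 : Int)) (by omega) (by omega)

-- ===== VERDICT (by name: the statement is the Claim_ definition above) =====
theorem is_valid_queen_placement_spec : Claim_equal_is_valid_queen_placement := by
  intro board _ _
  unfold Spec_is_valid_queen_placement
  rw [Bool.eq_iff_iff]
  simp only [is_valid_queen_placement, isvqLoop_iff,
    is_valid_queen_placement_alt, isvqOuter_iff, isvqInner_iff]
  simp only [PySem.Set.empty, List.not_mem_nil, not_false_iff, imp_true_iff, and_true]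
  rw [nodup_map_pyRange_iff board _ 8, nodup_map_pyRange_iff board _ 8]
  constructor
  · rintro ⟨hM, hA⟩ j hj i hi
    rw [PySem.List.mem_pyRange_one] at hj hi
    rintro (heq | heq)
    · exact hM j hj.1 hj.2 i hi.1 hi.2 (by omega)
    · exact hA j hj.1 hj.2 i hi.1 hi.2 (by omega)
  · intro h
    constructor
    · intro j hj0 hjb i hi0 hij heq
      exact h j (PySem.List.mem_pyRange_one.mpr ⟨hj0, hjb⟩)
              i (PySem.List.mem_pyRange_one.mpr ⟨hi0, hij⟩) (Or.inl (by omega))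
    · intro j hj0 hjb i hi0 hij heq
      exact h j (PySem.List.mem_pyRange_one.mpr ⟨hj0, hjb⟩)
              i (PySem.List.mem_pyRange_one.mpr ⟨hi0, hij⟩) (Or.inr (by omega))
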